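-- pv_equiv track=rewrite | github.com/broadinstitute/qprimer_designer | src/qprimer_designer/commands/generate.py | count_primer_pairs
-- ===== SOURCE A (Python) =====
-- import bisect
--
-- def count_primer_pairs(fors: dict, revs: dict, min_amp_len: int, max_amp_len: int) -> int:
--     """Count possible amplicons based on forward start and reverse end positions."""
--     sts = sorted(fors.values())
--     ens = sorted(revs.values())
--
--     count = 0
--     for st in sts:
--         left = bisect.bisect_left(ens, st + min_amp_len)
--         right = bisect.bisect_right(ens, st + max_amp_len)
--         count += right - left
--
--     return count
-- ===== SOURCE B (Python) =====
-- def count_primer_pairs(fors: dict, revs: dict, min_amp_len: int, max_amp_len: int) -> int: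
--     """Count possible amplicons based on forward start and reverse end positions."""
--     ens = list(revs.values())
--     total = 0
--     for st in fors.values():
--         hi = st + max_amp_len
--         lo = st + min_amp_len
--         total += sum(1 for e in ens if e <= hi) - sum(1 for e in ens if e < lo)
--     return total
-- ===== Notes on version B (the rewrite author's own statement) =====
-- stated objective: simpler
-- what changed: Drops both sorts and the binary searches entirely: for each forward start it counts reverse ends <= st+max and subtracts those < st+min by direct linear counting over the unsorted values.
import Mathlib
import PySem

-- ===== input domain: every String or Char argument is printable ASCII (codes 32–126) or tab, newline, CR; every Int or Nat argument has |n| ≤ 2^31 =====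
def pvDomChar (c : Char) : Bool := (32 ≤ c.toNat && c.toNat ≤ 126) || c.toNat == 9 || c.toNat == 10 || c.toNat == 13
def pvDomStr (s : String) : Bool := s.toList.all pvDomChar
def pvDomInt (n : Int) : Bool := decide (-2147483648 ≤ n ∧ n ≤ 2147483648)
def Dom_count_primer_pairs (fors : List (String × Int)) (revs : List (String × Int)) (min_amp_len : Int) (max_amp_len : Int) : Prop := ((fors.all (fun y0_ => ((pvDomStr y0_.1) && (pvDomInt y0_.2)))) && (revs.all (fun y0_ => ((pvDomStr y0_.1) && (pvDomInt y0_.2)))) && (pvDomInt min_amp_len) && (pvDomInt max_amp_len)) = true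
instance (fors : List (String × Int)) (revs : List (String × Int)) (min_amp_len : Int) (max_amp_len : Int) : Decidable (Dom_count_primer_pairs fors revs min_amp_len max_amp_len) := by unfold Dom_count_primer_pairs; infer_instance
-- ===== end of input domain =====

-- B drops both sorts and the binary searches: for each forward start it counts reverse ends
-- ≤ st+max and subtracts those < st+min by direct linear counting over the unsorted values (simpler).

-- ===== PORT A =====
def count_primer_pairs (fors : List (String × Int)) (revs : List (String × Int)) (min_amp_len : Int) (max_amp_len : Int) : Int :=
  let sts := PySem.List.sorted (fors.map Prod.snd) (fun x => x)
  let ens := PySem.List.sorted (revs.map Prod.snd) (fun x => x)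
  sts.foldl (fun count st =>
    let left := PySem.List.bisectLeft ens (st + min_amp_len)
    let right := PySem.List.bisectRight ens (st + max_amp_len)
    count + ((right : Int) - (left : Int))) 0

-- ===== PORT B =====
def count_primer_pairs_alt (fors : List (String × Int)) (revs : List (String × Int)) (min_amp_len : Int) (max_amp_len : Int) : Int :=
  let ens := revs.map Prod.snd
  (fors.map Prod.snd).foldl (fun total st =>
    let hi := st + max_amp_len
    let lo := st + min_amp_len
    total + ((ens.countP (fun e => e ≤ hi) : Int) - (ens.countP (fun e => e < lo) : Int))) 0

-- ===== PRECONDITION & SPEC =====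
def Spec_count_primer_pairs (fors : List (String × Int)) (revs : List (String × Int)) (min_amp_len : Int) (max_amp_len : Int) (out : Int) : Prop := out = count_primer_pairs_alt fors revs min_amp_len max_amp_len
instance (fors : List (String × Int)) (revs : List (String × Int)) (min_amp_len : Int) (max_amp_len : Int) (out : Int) : Decidable (Spec_count_primer_pairs fors revs min_amp_len max_amp_len out) := by unfold Spec_count_primer_pairs; infer_instance

-- ===== CLAIM (what is proved, stated in full; the proofs are below) =====
def Claim_equal_count_primer_pairs : Prop := ∀ (fors : List (String × Int)) (revs : List (String × Int)) (min_amp_len : Int) (max_amp_len : Int), Dom_count_primer_pairs fors revs min_amp_len max_amp_len → Spec_count_primer_pairs fors revs min_amp_len max_amp_len (count_primer_pairs fors revs min_amp_len max_amp_len)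

-- ===== LEMMAS AND PROOFS =====

-- On a ≤-sorted list, a position n with everything strictly-p before it and nothing p from it on
-- pins countP p at n.
theorem countP_eq_of_split (l : List Int) (p : Int → Bool) (n : ℕ) (hn : n ≤ l.length)
    (h1 : ∀ (j : ℕ) (hj : j < l.length), j < n → p l[j])
    (h2 : ∀ (j : ℕ) (hj : j < l.length), n ≤ j → ¬ p l[j]) :
    l.countP p = n := by
  induction l generalizing n with
  | nil =>
    simp only [List.length_nil, Nat.le_zero] at hn
    simp [hn]
  | cons a t ih =>
    cases n with
    | zero =>
      have hpa : ¬ p a = true := by simpa using h2 0 (by simp) (Nat.le_refl 0)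
      have ht : List.countP p t = 0 := by
        apply List.countP_eq_zero.mpr
        intro x hx
        obtain ⟨j, hj, rfl⟩ := List.mem_iff_getElem.mp hx
        simpa using h2 (j + 1) (by simpa using Nat.succ_lt_succ hj) (Nat.zero_le _)
      simp [hpa, ht]
    | succ m =>
      have hpa : p a = true := by simpa using h1 0 (by simp) (Nat.succ_pos m)
      have ht : List.countP p t = m :=
        ih m (by simpa using hn)
          (fun j hj hjm => by
            simpa using h1 (j + 1) (by simpa using Nat.succ_lt_succ hj) (Nat.succ_lt_succ hjm))
          (fun j hj hmj => by
            simpa using h2 (j + 1) (by simpa using Nat.succ_lt_succ hj) (Nat.succ_le_succ hmj))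
      simp [hpa, ht]

theorem bisectLeft_eq_countP (l : List Int) (x : Int)
    (hs : List.Pairwise (fun a b => a ≤ b) l) :
    PySem.List.bisectLeft l x = l.countP (fun e => e < x) := by
  obtain ⟨hle, h1, h2⟩ := PySem.List.bisectLeft_spec l x hs
  exact (countP_eq_of_split l _ _ hle
    (fun j hj hjn => by simpa using h1 j hj hjn)
    (fun j hj hnj => by simpa using h2 j hj hnj)).symm

theorem bisectRight_eq_countP (l : List Int) (x : Int)
    (hs : List.Pairwise (fun a b => a ≤ b) l) :
    PySem.List.bisectRight l x = l.countP (fun e => e ≤ x) := by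
  obtain ⟨hle, h1, h2⟩ := PySem.List.bisectRight_spec l x hs
  exact (countP_eq_of_split l _ _ hle
    (fun j hj hjn => by simpa using h1 j hj hjn)
    (fun j hj hnj => by simpa using Int.not_le.mpr (h2 j hj hnj))).symm

-- A fold that only accumulates f of each element is the sum of the per-element contributions.
theorem foldl_add_eq_sum (l : List Int) (f : Int → Int) (a : Int) :
    l.foldl (fun acc x => acc + f x) a = a + (l.map f).sum := by
  induction l generalizing a with
  | nil => simp
  | cons y t ih => simp [List.foldl_cons, ih, add_assoc]

-- ===== VERDICT (by name: the statement is the Claim_ definition above) =====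
theorem count_primer_pairs_spec : Claim_equal_count_primer_pairs := by
  intro fors revs mn mx _
  unfold Spec_count_primer_pairs count_primer_pairs count_primer_pairs_alt
  simp only []
  set vs := fors.map Prod.snd with hvs
  set es := revs.map Prod.snd with hes
  have hsorted : List.Pairwise (fun a b => a ≤ b) (PySem.List.sorted es (fun x => x)) :=
    PySem.List.sorted_pairwise es (fun x => x)
  have hperm : (PySem.List.sorted es (fun x => x)).Perm es :=
    PySem.List.sorted_perm es (fun x => x) false
  have hterm : ∀ st : Int,
      ((PySem.List.bisectRight (PySem.List.sorted es (fun x => x)) (st + mx) : Int)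
        - (PySem.List.bisectLeft (PySem.List.sorted es (fun x => x)) (st + mn) : Int))
      = ((es.countP (fun e => e ≤ st + mx) : Int) - (es.countP (fun e => e < st + mn) : Int)) := by
    intro st
    rw [bisectRight_eq_countP _ _ hsorted, bisectLeft_eq_countP _ _ hsorted,
      hperm.countP_eq, hperm.countP_eq]
  rw [foldl_add_eq_sum _ (fun st =>
        ((PySem.List.bisectRight (PySem.List.sorted es (fun x => x)) (st + mx) : Int)
          - (PySem.List.bisectLeft (PySem.List.sorted es (fun x => x)) (st + mn) : Int))),
      foldl_add_eq_sum _ (fun st =>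
        ((es.countP (fun e => e ≤ st + mx) : Int) - (es.countP (fun e => e < st + mn) : Int)))]
  have hmapeq : (PySem.List.sorted vs (fun x => x)).map (fun st =>
        ((PySem.List.bisectRight (PySem.List.sorted es (fun x => x)) (st + mx) : Int)
          - (PySem.List.bisectLeft (PySem.List.sorted es (fun x => x)) (st + mn) : Int)))
      = (PySem.List.sorted vs (fun x => x)).map (fun st =>
        ((es.countP (fun e => e ≤ st + mx) : Int) - (es.countP (fun e => e < st + mn) : Int))) :=
    List.map_congr_left (fun st _ => hterm st)
  rw [hmapeq]
  rw [zero_add, zero_add]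
  exact List.Perm.sum_eq (List.Perm.map
    (fun st => ((es.countP (fun e => e ≤ st + mx) : Int) - (es.countP (fun e => e < st + mn) : Int)))
    (PySem.List.sorted_perm vs (fun x => x) false))
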